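-- pv_equiv track=rewrite | github.com/WitoldTrzeciakowski/Project_AAC | Spectral_stuff/graph_checks.py | is_k2_join_kn4_plus_2k1
-- ===== SOURCE A (Python) =====
-- def is_k2_join_kn4_plus_2k1(adj_matrix):
--     n = len(adj_matrix)
--     if any(len(row) != n for row in adj_matrix):
--         return False
--     degrees = [sum(row) for row in adj_matrix]
--     k2_vertices = [i for i, degree in enumerate(degrees) if degree == n-1]
--     if len(k2_vertices) != 2:
--         return False
--     remaining_vertices = [v for v in range(n) if v not in k2_vertices]
--     submatrix = [[adj_matrix[i][j] for j in remaining_vertices] for i in remaining_vertices]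
--     visited = set()
--
--     def dfs(v, submatrix):
--         stack = [v]
--         component = []
--         while stack:
--             node = stack.pop()
--             if node not in visited:
--                 visited.add(node)
--                 component.append(node)
--                 neighbors = [i for i, connected in enumerate(submatrix[node]) if connected]
--                 stack.extend(neighbors)
--         return component
--
--     components = []
--     for v in range(len(submatrix)):
--         if v not in visited:
--             components.append(dfs(v, submatrix))
--     component_sizes = sorted(len(c) for c in components)
--     if component_sizes != [1, 1, n-4]:
--         return False
--     for v in k2_vertices:
--         if not all(adj_matrix[v][rv] == 1 for rv in remaining_vertices):
--             return False
--     return True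
-- ===== SOURCE B (Python) =====
-- def is_k2_join_kn4_plus_2k1(adj_matrix):
--     n = len(adj_matrix)
--     if any(len(row) != n for row in adj_matrix):
--         return False
--     hubs = [i for i, row in enumerate(adj_matrix) if sum(row) == n - 1]
--     if len(hubs) != 2:
--         return False
--     rest = [v for v in range(n) if v not in hubs]
--     if any(adj_matrix[h][v] != 1 for h in hubs for v in rest):
--         return False
--     sub = [[adj_matrix[i][j] for j in rest] for i in rest]
--     sizes = []
--     pool = list(range(len(sub)))
--     while pool:
--         comp = [pool[0]]
--         grew = True
--         while grew:
--             grew = False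
--             for u in pool:
--                 if u not in comp and any(sub[c][u] for c in comp):
--                     comp.append(u)
--                     grew = True
--         sizes.append(len(comp))
--         pool = [u for u in pool if u not in comp]
--     return sorted(sizes) == [1, 1, n - 4]
-- ===== Notes on version B (the rewrite author's own statement) =====
-- stated objective: alternative
-- what changed: The explicit-stack DFS with a mutable visited set over the submatrix is replaced by repeated fixpoint saturation: components are peeled off a pool by growing a component from the pool's head until no pool vertex has an in-edge from it; the hub-adjacency check is hoisted before the component check and the early-return chain becomes a single final comparison.
import Mathlib
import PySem

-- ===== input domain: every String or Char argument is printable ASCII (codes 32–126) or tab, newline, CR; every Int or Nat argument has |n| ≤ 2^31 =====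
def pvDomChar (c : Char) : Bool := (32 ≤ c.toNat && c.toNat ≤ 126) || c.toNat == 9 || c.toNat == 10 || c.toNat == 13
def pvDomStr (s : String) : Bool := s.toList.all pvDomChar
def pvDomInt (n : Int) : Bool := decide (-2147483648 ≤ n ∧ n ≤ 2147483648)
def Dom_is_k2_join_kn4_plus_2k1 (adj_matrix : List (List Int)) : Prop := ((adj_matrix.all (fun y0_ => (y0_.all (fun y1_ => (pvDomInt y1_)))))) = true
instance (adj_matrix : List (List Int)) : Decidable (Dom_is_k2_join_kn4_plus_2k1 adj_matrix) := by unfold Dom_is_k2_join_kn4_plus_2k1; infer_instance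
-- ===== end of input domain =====

-- B replaces A's explicit-stack DFS over the submatrix by fixpoint saturation peeling
-- (grow a component from the pool head until stable), with the hub check hoisted: an
-- alternative algorithm of similar cost, proved to return the same Bool everywhere.


-- ===== PORT A =====
-- `[i for i, connected in enumerate(submatrix[node]) if connected]`:
-- the indices of the truthy (≠ 0) entries of the row, in order.
def pvNbrs (g : List (List Int)) (node : Nat) : List Nat :=
  (List.range (g.getD node []).length).filter (fun i => (g.getD node []).getD i 0 ≠ 0)

-- fuel bound for the DFS stack loop: Σᵢ (|row i| + 1) over the whole matrix
def pvListWeight (g : List (List Int)) : Nat :=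
  ((List.range g.length).map (fun i => (g.getD i []).length + 1)).sum

-- the `while stack:` loop of dfs; Python's stack top is the list's end, modelled
-- head-first; the fuel only totalises the loop and is proved sufficient below
def dfsLoop (g : List (List Int)) (fuel : Nat) (stack : List Nat)
    (visited : PySem.Set Nat) (component : List Nat) : List Nat × PySem.Set Nat :=
  match fuel with
  | 0 => (component, visited)
  | f + 1 =>
    match stack with
    | [] => (component, visited)
    | node :: rest =>
      if node ∈ visited then dfsLoop g f rest visited component
      else dfsLoop g f ((pvNbrs g node).reverse ++ rest) (PySem.Set.add visited node)
            (component ++ [node])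

-- body of `for v in range(len(submatrix)): if v not in visited: components.append(dfs(v))`
def dfsStep (g : List (List Int)) (acc : List (List Nat) × PySem.Set Nat) (v : Nat) :
    List (List Nat) × PySem.Set Nat :=
  if v ∈ acc.2 then acc
  else
    let r := dfsLoop g (1 + pvListWeight g) [v] acc.2 []
    (acc.1 ++ [r.1], r.2)

def is_k2_join_kn4_plus_2k1 (adj_matrix : List (List Int)) : Bool :=
  let n := adj_matrix.length
  if adj_matrix.any (fun row => row.length ≠ n) then false
  else
    let degrees : List Int := adj_matrix.map (fun row => row.sum)
    -- `[i for i, degree in enumerate(degrees) if degree == n-1]` (indices over the list)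
    let k2_vertices : List Nat := (List.range n).filter (fun i => degrees.getD i 0 = (n : Int) - 1)
    if k2_vertices.length ≠ 2 then false
    else
      let remaining : List Nat := (List.range n).filter (fun v => v ∉ k2_vertices)
      let submatrix : List (List Int) :=
        remaining.map (fun i => remaining.map (fun j => (adj_matrix.getD i []).getD j 0))
      let st := (List.range submatrix.length).foldl (dfsStep submatrix) ([], PySem.Set.empty)
      let component_sizes : List Int :=
        PySem.List.sorted (st.1.map (fun c => (c.length : Int))) (fun x => x) false
      if component_sizes ≠ [1, 1, (n : Int) - 4] then false
      else if k2_vertices.any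
          (fun v => !(remaining.all (fun rv => decide ((adj_matrix.getD v []).getD rv 0 = 1))))
        then false
      else true

-- ===== PORT B =====
-- one `for u in pool:` pass of the inner `while grew:` loop, state (comp, grew)
def growPass (sub : List (List Int)) (l : List Nat) (st : List Nat × Bool) : List Nat × Bool :=
  l.foldl
    (fun st u =>
      if u ∉ st.1 ∧ st.1.any (fun c => decide ((sub.getD c []).getD u 0 ≠ 0))
      then (st.1 ++ [u], true) else st)
    st

-- `while grew:` — fuel-guarded; fuel pool.length + 1 is proved sufficient below
def saturate (sub : List (List Int)) (pool : List Nat) (fuel : Nat) (comp : List Nat) :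
    List Nat :=
  match fuel with
  | 0 => comp
  | f + 1 =>
    let st := growPass sub pool (comp, false)
    if st.2 then saturate sub pool f st.1 else st.1

-- the outer `while pool:` loop, collecting component sizes in peel order;
-- the fuel (one unit per peeled component) is proved sufficient below
def peel (sub : List (List Int)) (fuel : Nat) (pool : List Nat) : List Nat :=
  match fuel with
  | 0 => []
  | f + 1 =>
    match pool with
    | [] => []
    | seed :: t =>
      let comp := saturate sub (seed :: t) ((seed :: t).length + 1) [seed]
      comp.length :: peel sub f ((seed :: t).filter (fun u => u ∉ comp))

def is_k2_join_kn4_plus_2k1_alt (adj_matrix : List (List Int)) : Bool :=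
  let n := adj_matrix.length
  if adj_matrix.any (fun row => row.length ≠ n) then false
  else
    let hubs : List Nat :=
      (List.range n).filter (fun i => (adj_matrix.getD i []).sum = (n : Int) - 1)
    if hubs.length ≠ 2 then false
    else
      let rest : List Nat := (List.range n).filter (fun v => v ∉ hubs)
      if hubs.any (fun h => rest.any (fun v => decide ((adj_matrix.getD h []).getD v 0 ≠ 1)))
        then false
      else
        let sub : List (List Int) :=
          rest.map (fun i => rest.map (fun j => (adj_matrix.getD i []).getD j 0))
        let sizes := peel sub sub.length (List.range sub.length)
        decide (PySem.List.sorted (sizes.map (fun s => Int.ofNat s)) (fun x => x) false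
          = [1, 1, (n : Int) - 4])

-- ===== PRECONDITION & SPEC =====
def Spec_is_k2_join_kn4_plus_2k1 (adj_matrix : List (List Int)) (out : Bool) : Prop := out = is_k2_join_kn4_plus_2k1_alt adj_matrix
instance (adj_matrix : List (List Int)) (out : Bool) : Decidable (Spec_is_k2_join_kn4_plus_2k1 adj_matrix out) := by unfold Spec_is_k2_join_kn4_plus_2k1; infer_instance

-- ===== CLAIM (what is proved, stated in full; the proofs are below) =====
def Claim_equal_is_k2_join_kn4_plus_2k1 : Prop := ∀ (adj_matrix : List (List Int)), Dom_is_k2_join_kn4_plus_2k1 adj_matrix → Spec_is_k2_join_kn4_plus_2k1 adj_matrix (is_k2_join_kn4_plus_2k1 adj_matrix)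

-- ===== LEMMAS AND PROOFS =====

-- directed edge of the submatrix graph, as both programs test it
def pvEdge (g : List (List Int)) (s t : Nat) : Prop :=
  t < (g.getD s []).length ∧ (g.getD s []).getD t 0 ≠ 0

-- reachability along edges whose every vertex satisfies P
inductive pvRA (g : List (List Int)) (P : Nat → Prop) : Nat → Nat → Prop where
  | refl (s : Nat) (h : P s) : pvRA g P s s
  | step (s t u : Nat) (hs : P s) (he : pvEdge g s t) (ht : pvRA g P t u) : pvRA g P s u

lemma mem_pvNbrs (g : List (List Int)) (s t : Nat) : t ∈ pvNbrs g s ↔ pvEdge g s t := by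
  unfold pvNbrs pvEdge
  simp [List.mem_filter, List.mem_range]

lemma test_iff (sub : List (List Int)) (c u : Nat) :
    (sub.getD c []).getD u 0 ≠ 0 ↔ pvEdge sub c u := by
  unfold pvEdge
  constructor
  · intro h
    by_cases hu : u < (sub.getD c []).length
    · exact ⟨hu, h⟩
    · exact absurd (List.getD_eq_default _ _ (Nat.le_of_not_lt hu)) h
  · exact fun h => h.2

lemma pvRA_P {g : List (List Int)} {P : Nat → Prop} {s u : Nat}
    (h : pvRA g P s u) : P s ∧ P u := by
  induction h with
  | refl s hs => exact ⟨hs, hs⟩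
  | step s t u hs he ht ih => exact ⟨hs, ih.2⟩

lemma pvRA_mono {g : List (List Int)} {P Q : Nat → Prop} (hPQ : ∀ x, P x → Q x)
    {s u : Nat} (h : pvRA g P s u) : pvRA g Q s u := by
  induction h with
  | refl s hs => exact pvRA.refl s (hPQ s hs)
  | step s t u hs he ht ih => exact pvRA.step s t u (hPQ s hs) he ih

lemma pvRA_snoc {g : List (List Int)} {P : Nat → Prop} {s c u : Nat}
    (h : pvRA g P s c) (he : pvEdge g c u) (hu : P u) : pvRA g P s u := by
  induction h with
  | refl s hs => exact pvRA.step s u u hs he (pvRA.refl u hu)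
  | step s t c hs het ht ih => exact pvRA.step s t u hs het (ih he)

lemma pvRA_pull {g : List (List Int)} {P : Nat → Prop} {node s u : Nat}
    (h : pvRA g P s u) (hnode : P node) :
    pvRA g (fun x => P x ∧ x ≠ node) s u ∨ u = node ∨
      ∃ t, t ∈ pvNbrs g node ∧ pvRA g (fun x => P x ∧ x ≠ node) t u := by
  induction h with
  | refl s hs =>
    by_cases hsn : s = node
    · exact Or.inr (Or.inl hsn)
    · exact Or.inl (pvRA.refl s ⟨hs, hsn⟩)
  | step s t u hs he ht ih =>
    rcases ih with h' | h' | h'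
    · by_cases hsn : s = node
      · subst hsn
        exact Or.inr (Or.inr ⟨t, (mem_pvNbrs g s t).2 he, h'⟩)
      · exact Or.inl (pvRA.step s t u ⟨hs, hsn⟩ he h')
    · exact Or.inr (Or.inl h')
    · exact Or.inr (Or.inr h')

lemma dfs_pull (g : List (List Int)) (P : Nat → Prop) (node : Nat) (rest : List Nat)
    (hnode : P node) (u : Nat) :
    (∃ s, (s = node ∨ s ∈ rest) ∧ pvRA g P s u) ↔
      (u = node ∨ ∃ s, (s ∈ pvNbrs g node ∨ s ∈ rest) ∧
        pvRA g (fun x => P x ∧ x ≠ node) s u) := by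
  constructor
  · rintro ⟨s, hs, hra⟩
    rcases pvRA_pull hra hnode with h' | h' | h'
    · rcases hs with rfl | hs
      · exact absurd (pvRA_P h').1.2 (by simp)
      · exact Or.inr ⟨s, Or.inr hs, h'⟩
    · exact Or.inl h'
    · obtain ⟨t, ht, hra'⟩ := h'
      exact Or.inr ⟨t, Or.inl ht, hra'⟩
  · rintro (rfl | ⟨s, hs, hra⟩)
    · exact ⟨u, Or.inl rfl, pvRA.refl u hnode⟩
    · have hra' : pvRA g P s u := pvRA_mono (fun x hx => hx.1) hra
      rcases hs with hs | hs
      · exact ⟨node, Or.inl rfl,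
          pvRA.step node s u hnode ((mem_pvNbrs g node s).1 hs) hra'⟩
      · exact ⟨s, Or.inr hs, hra'⟩

lemma nodup_len_eq (a b : List Nat) (ha : a.Nodup) (hb : b.Nodup)
    (h : ∀ x, x ∈ a ↔ x ∈ b) : a.length = b.length :=
  ((List.perm_ext_iff_of_nodup ha hb).2 h).length_eq

lemma filter_two (L V' V D : List Nat) (h : ∀ x : Nat, x ∈ V' ↔ x ∈ V ∨ x ∈ D) :
    L.filter (fun x => x ∉ V') = (L.filter (fun x => x ∉ V)).filter (fun x => x ∉ D) := by
  rw [List.filter_filter]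
  apply List.filter_congr
  intro x _
  have hiff : (x ∉ V') ↔ ((x ∉ D) ∧ (x ∉ V)) := by rw [h x]; tauto
  simp [hiff, Bool.and_comm]

-- termination/fuel accounting for the DFS stack loop (proof-side only)
def pvWeight (g : List (List Int)) (V : PySem.Set Nat) : Nat :=
  ((Finset.range g.length).filter (fun i => i ∉ V)).sum (fun i => (g.getD i []).length + 1)

lemma pvWeight_key (g : List (List Int)) (V : PySem.Set Nat) (node : Nat) (h : node ∉ V) :
    (pvNbrs g node).length + pvWeight g (PySem.Set.add V node) < 1 + pvWeight g V := by
  have hset : (Finset.range g.length).filter (fun i => i ∉ PySem.Set.add V node)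
      = ((Finset.range g.length).filter (fun i => i ∉ V)).erase node := by
    ext i
    simp only [Finset.mem_erase, Finset.mem_filter, Finset.mem_range, PySem.Set.mem_add]
    tauto
  by_cases hn : node < g.length
  · have hmem : node ∈ (Finset.range g.length).filter (fun i => i ∉ V) := by
      simp [Finset.mem_filter, Finset.mem_range, hn, h]
    have hsum := Finset.sum_erase_add ((Finset.range g.length).filter (fun i => i ∉ V))
      (fun i => (g.getD i []).length + 1) hmem
    have hlen : (pvNbrs g node).length ≤ (g.getD node []).length := by
      unfold pvNbrs
      exact le_trans (List.length_filter_le _ _) (by simp)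
    unfold pvWeight
    rw [hset]
    beta_reduce at hsum ⊢
    omega
  · have hrow : g.getD node [] = [] := by
      have : g.length ≤ node := Nat.le_of_not_lt hn
      simp [List.getD_eq_getElem?_getD, List.getElem?_eq_none this]
    have hnbrs : (pvNbrs g node).length = 0 := by
      unfold pvNbrs
      rw [hrow]
      simp
    have hnm : node ∉ (Finset.range g.length).filter (fun i => i ∉ V) := by
      simp [Finset.mem_filter, Finset.mem_range, hn]
    unfold pvWeight
    rw [hset, Finset.erase_eq_of_notMem hnm]
    omega

lemma pvWeight_le (g : List (List Int)) (V : PySem.Set Nat) :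
    pvWeight g V ≤ pvListWeight g := by
  have hgen : ∀ n : Nat, ((List.range n).map (fun i => (g.getD i []).length + 1)).sum =
      ∑ i ∈ Finset.range n, ((g.getD i []).length + 1) := by
    intro n
    induction n with
    | zero => simp
    | succ m ih => rw [List.range_succ, Finset.sum_range_succ, ← ih]; simp
  unfold pvWeight pvListWeight
  rw [hgen]
  exact Finset.sum_le_sum_of_subset (Finset.filter_subset _ _)

lemma dfsLoop_spec (g : List (List Int)) :
    ∀ (fuel : Nat) (stack : List Nat) (V : PySem.Set Nat) (comp : List Nat),
      stack.length + pvWeight g V ≤ fuel →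
      ∃ δ : List Nat,
        (dfsLoop g fuel stack V comp).1 = comp ++ δ ∧ δ.Nodup ∧
        (∀ u, u ∈ δ ↔ ∃ s, s ∈ stack ∧ pvRA g (fun x => x ∉ V) s u) ∧
        (∀ x, x ∈ (dfsLoop g fuel stack V comp).2 ↔ x ∈ V ∨ x ∈ δ) := by
  intro fuel
  induction fuel with
  | zero =>
    intro stack V comp hf
    match stack with
    | [] => exact ⟨[], by simp [dfsLoop], by simp, by simp, by simp [dfsLoop]⟩
    | node :: rest => exact absurd hf (by simp)
  | succ f ih =>
    intro stack V comp hf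
    match stack with
    | [] => exact ⟨[], by simp [dfsLoop], by simp, by simp, by simp [dfsLoop]⟩
    | node :: rest =>
      by_cases hmem : node ∈ V
      · have hred : dfsLoop g (f + 1) (node :: rest) V comp = dfsLoop g f rest V comp := by
          simp [dfsLoop, hmem]
        have hf' : rest.length + pvWeight g V ≤ f := by
          simp only [List.length_cons] at hf
          omega
        rw [hred]
        obtain ⟨δ, h1, h2, h3, h4⟩ := ih rest V comp hf'
        refine ⟨δ, h1, h2, ?_, h4⟩
        intro u
        rw [h3 u]
        constructor
        · rintro ⟨s, hs, hra⟩
          exact ⟨s, List.mem_cons_of_mem _ hs, hra⟩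
        · rintro ⟨s, hs, hra⟩
          rcases List.mem_cons.1 hs with rfl | hs
          · exact absurd hmem (pvRA_P hra).1
          · exact ⟨s, hs, hra⟩
      · have hkey := pvWeight_key g V node hmem
        have hred : dfsLoop g (f + 1) (node :: rest) V comp =
            dfsLoop g f ((pvNbrs g node).reverse ++ rest) (PySem.Set.add V node)
              (comp ++ [node]) := by
          simp [dfsLoop, hmem]
        have hf' : ((pvNbrs g node).reverse ++ rest).length +
            pvWeight g (PySem.Set.add V node) ≤ f := by
          simp only [List.length_append, List.length_reverse, List.length_cons] at hf ⊢
          omega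
        rw [hred]
        obtain ⟨δ₂, h1, h2, h3, h4⟩ := ih ((pvNbrs g node).reverse ++ rest) (PySem.Set.add V node) (comp ++ [node]) hf'
        have hpred : ∀ x : Nat, (x ∉ PySem.Set.add V node) ↔ (x ∉ V ∧ x ≠ node) := by
          intro x
          rw [PySem.Set.mem_add]
          tauto
        have hmemδ₂ : ∀ u ∈ δ₂, u ∉ V ∧ u ≠ node := by
          intro u hu
          obtain ⟨s, hs, hra⟩ := (h3 u).1 hu
          exact (hpred u).1 (pvRA_P hra).2
        have hcong : ∀ s u : Nat, pvRA g (fun x => x ∉ PySem.Set.add V node) s u ↔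
            pvRA g (fun x => x ∉ V ∧ x ≠ node) s u := by
          intro s u
          exact ⟨pvRA_mono (fun x hx => (hpred x).1 hx), pvRA_mono (fun x hx => (hpred x).2 hx)⟩
        refine ⟨node :: δ₂, by simpa [List.append_assoc] using h1, ?_, ?_, ?_⟩
        · exact List.nodup_cons.2 ⟨fun hc => (hmemδ₂ node hc).2 rfl, h2⟩
        · intro u
          rw [List.mem_cons, h3 u]
          constructor
          · rintro (rfl | ⟨s, hs, hra⟩)
            · exact ⟨u, by simp, pvRA.refl u hmem⟩
            · have hs' : s ∈ pvNbrs g node ∨ s ∈ rest := by simpa using hs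
              obtain ⟨s', hs'', hra'⟩ := (dfs_pull g (fun x => x ∉ V) node rest hmem u).2
                (Or.inr ⟨s, hs', (hcong s u).1 hra⟩)
              exact ⟨s', by simpa using hs'', hra'⟩
          · rintro ⟨s, hs, hra⟩
            have hs' : s = node ∨ s ∈ rest := by simpa using hs
            rcases (dfs_pull g (fun x => x ∉ V) node rest hmem u).1 ⟨s, hs', hra⟩ with
              h' | ⟨s', hs'', hra'⟩
            · exact Or.inl h'
            · exact Or.inr ⟨s', by simpa using hs'', (hcong s' u).2 hra'⟩
        · intro x
          rw [h4 x, PySem.Set.mem_add, List.mem_cons]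
          tauto

lemma growPass_ext (sub : List (List Int)) :
    ∀ (l comp : List Nat) (b : Bool),
      ∃ ext, growPass sub l (comp, b) = (comp ++ ext, b || !ext.isEmpty) ∧
        ∀ x ∈ ext, x ∈ l := by
  intro l
  induction l with
  | nil => exact fun comp b => ⟨[], by simp [growPass], by simp⟩
  | cons u t ih =>
    intro comp b
    unfold growPass at ih ⊢
    simp only [List.foldl_cons]
    split
    · obtain ⟨ext, hext, hmem⟩ := ih (comp ++ [u]) true
      refine ⟨u :: ext, ?_, ?_⟩
      · rw [hext]
        simp
      · intro x hx
        rcases List.mem_cons.1 hx with rfl | hx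
        · exact List.mem_cons_self
        · exact List.mem_cons_of_mem _ (hmem x hx)
    · obtain ⟨ext, hext, hmem⟩ := ih comp b
      exact ⟨ext, hext, fun x hx => List.mem_cons_of_mem _ (hmem x hx)⟩

lemma growPass_nodup (sub : List (List Int)) :
    ∀ (l comp : List Nat) (b : Bool), comp.Nodup → (growPass sub l (comp, b)).1.Nodup := by
  intro l
  induction l with
  | nil => intro comp b h; simpa [growPass]
  | cons u t ih =>
    intro comp b h
    unfold growPass at ih ⊢
    simp only [List.foldl_cons]
    split
    · next hcond =>
      refine ih _ _ ?_
      simp only [List.nodup_append, List.nodup_cons, List.nodup_nil]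
      refine ⟨h, by simp, ?_⟩
      intro x hx y hy
      have hyu : y = u := by simpa using hy
      subst hyu
      intro hxy
      exact hcond.1 (hxy ▸ hx)
    · exact ih _ _ h

lemma growPass_sound (sub : List (List Int)) (R : Nat → Prop) :
    ∀ (l comp : List Nat) (b : Bool),
      (∀ c u, R c → u ∈ l → pvEdge sub c u → R u) →
      (∀ x ∈ comp, R x) → ∀ x ∈ (growPass sub l (comp, b)).1, R x := by
  intro l
  induction l with
  | nil => intro comp b _ h; simpa [growPass]
  | cons u t ih =>
    intro comp b hR h
    unfold growPass at ih ⊢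
    simp only [List.foldl_cons]
    have hR' : ∀ c u', R c → u' ∈ t → pvEdge sub c u' → R u' :=
      fun c u' hc hu' => hR c u' hc (List.mem_cons_of_mem _ hu')
    split
    · next hcond =>
      refine ih _ _ hR' ?_
      intro x hx
      rcases List.mem_append.1 hx with hx | hx
      · exact h x hx
      · have hxu : x = u := by simpa using hx
        subst hxu
        obtain ⟨c, hc, htest⟩ := List.any_eq_true.1 hcond.2
        exact hR c x (h c hc) (by simp) ((test_iff sub c x).1 (by simpa using htest))
    · exact ih _ _ hR' h

lemma growPass_stable (sub : List (List Int)) :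
    ∀ (l comp : List Nat),
      (growPass sub l (comp, false)).2 = false →
      (growPass sub l (comp, false)).1 = comp ∧
        ∀ u ∈ l, u ∈ comp ∨ ∀ c ∈ comp, ¬ pvEdge sub c u := by
  intro l
  induction l with
  | nil => intro comp _; exact ⟨by simp [growPass], by simp⟩
  | cons u t ih =>
    intro comp hf
    unfold growPass at ih hf ⊢
    simp only [List.foldl_cons] at hf ⊢
    by_cases hcond : u ∉ (comp, false).1 ∧
        ((comp, false).1.any fun c => decide ((sub.getD c []).getD u 0 ≠ 0)) = true
    · exfalso
      rw [if_pos hcond] at hf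
      obtain ⟨ext, hext, -⟩ := growPass_ext sub t ((comp, false).1 ++ [u]) true
      unfold growPass at hext
      rw [hext] at hf
      simp at hf
    · rw [if_neg hcond] at hf ⊢
      obtain ⟨h1, h2⟩ := ih comp hf
      refine ⟨h1, ?_⟩
      intro v hv
      rcases List.mem_cons.1 hv with rfl | hv
      · simp only [not_and] at hcond
        by_cases hvc : v ∈ comp
        · exact Or.inl hvc
        · refine Or.inr ?_
          intro c hc he
          have := hcond (by simpa using hvc)
          have : ∃ c ∈ comp, (sub.getD c []).getD v 0 ≠ 0 := ⟨c, hc, (test_iff sub c v).2 he⟩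
          simp only [List.any_eq_true] at hcond
          exact absurd (by simpa using this) (hcond (by simpa using hvc))
      · exact h2 v hv

lemma saturate_spec (sub : List (List Int)) (pool : List Nat) (R : Nat → Prop)
    (hclosed : ∀ c u, R c → u ∈ pool → pvEdge sub c u → R u) :
    ∀ (fuel : Nat) (comp : List Nat),
      pool.Nodup → comp.Nodup → (∀ x ∈ comp, x ∈ pool) →
      pool.length + 1 ≤ fuel + comp.length →
      (∀ x ∈ comp, R x) →
      (saturate sub pool fuel comp).Nodup ∧
      (∀ x ∈ comp, x ∈ saturate sub pool fuel comp) ∧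
      (∀ x ∈ saturate sub pool fuel comp, x ∈ pool) ∧
      (∀ x ∈ saturate sub pool fuel comp, R x) ∧
      (∀ u ∈ pool, u ∉ saturate sub pool fuel comp →
        ∀ c ∈ saturate sub pool fuel comp, ¬ pvEdge sub c u) := by
  intro fuel
  induction fuel with
  | zero =>
    intro comp hp hc hsubp hlen _
    exfalso
    have : comp.length ≤ pool.length := (List.subperm_of_subset hc hsubp).length_le
    omega
  | succ f ih =>
    intro comp hp hc hsubp hlen hsound
    obtain ⟨ext, hext, hmeml⟩ := growPass_ext sub pool comp false
    have hshow : saturate sub pool (f + 1) comp =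
        (if (growPass sub pool (comp, false)).2 = true
          then saturate sub pool f (growPass sub pool (comp, false)).1
          else (growPass sub pool (comp, false)).1) := rfl
    cases ext with
    | nil =>
      have hsnd : (growPass sub pool (comp, false)).2 = false := by rw [hext]; simp
      obtain ⟨hfst, hstab⟩ := growPass_stable sub pool comp hsnd
      have hres : saturate sub pool (f + 1) comp = comp := by
        rw [hshow, if_neg (by simp [hsnd]), hfst]
      rw [hres]
      refine ⟨hc, fun x hx => hx, hsubp, hsound, ?_⟩
      intro u hu hnc c hcm
      rcases hstab u hu with h | h
      · exact absurd h hnc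
      · exact h c hcm
    | cons e et =>
      have hsnd : (growPass sub pool (comp, false)).2 = true := by rw [hext]; simp
      have hfst : (growPass sub pool (comp, false)).1 = comp ++ e :: et := by rw [hext]
      have hres : saturate sub pool (f + 1) comp = saturate sub pool f (comp ++ e :: et) := by
        rw [hshow, if_pos hsnd, hfst]
      rw [hres]
      have hnodup' : (comp ++ e :: et).Nodup := by
        have := growPass_nodup sub pool comp false hc
        rwa [hfst] at this
      have hsubp' : ∀ x ∈ comp ++ e :: et, x ∈ pool := by
        intro x hx
        rcases List.mem_append.1 hx with hx | hx
        · exact hsubp x hx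
        · exact hmeml x hx
      have hsound' : ∀ x ∈ comp ++ e :: et, R x := by
        have := growPass_sound sub R pool comp false hclosed hsound
        rwa [hfst] at this
      have hlen' : pool.length + 1 ≤ f + (comp ++ e :: et).length := by
        simp only [List.length_append, List.length_cons]
        omega
      obtain ⟨a1, a2, a3, a4, a5⟩ := ih (comp ++ e :: et) hp hnodup' hsubp' hlen' hsound'
      exact ⟨a1, fun x hx => a2 x (by simp [hx]), a3, a4, a5⟩

lemma stable_reach (sub : List (List Int)) (pool : List Nat) (seed : Nat) (C : List Nat)
    (hseedC : seed ∈ C)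
    (hCsound : ∀ x ∈ C, pvRA sub (fun x => x ∈ pool) seed x)
    (hstab : ∀ u ∈ pool, u ∉ C → ∀ c ∈ C, ¬ pvEdge sub c u) :
    ∀ u, u ∈ C ↔ pvRA sub (fun x => x ∈ pool) seed u := by
  have aux : ∀ s u, pvRA sub (fun x => x ∈ pool) s u → s ∈ C → u ∈ C := by
    intro s u h
    induction h with
    | refl s hs => exact id
    | step s t u hs he ht ih =>
      intro hsC
      have htpool : t ∈ pool := (pvRA_P ht).1
      have htC : t ∈ C := by
        by_contra hn
        exact hstab t htpool hn s hsC he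
      exact ih htC
  exact fun u => ⟨hCsound u, fun h => aux seed u h hseedC⟩

lemma pvRA_bridge (g : List (List Int)) (V pool : List Nat)
    (Hg : ∀ row ∈ g, row.length = g.length)
    (hpool : ∀ x : Nat, x ∈ pool ↔ x < g.length ∧ x ∉ V)
    (seed : Nat) (hs : seed < g.length) (u : Nat) :
    pvRA g (fun x => x ∉ V) seed u ↔ pvRA g (fun x => x ∈ pool) seed u := by
  constructor
  · have aux : ∀ s u, pvRA g (fun x => x ∉ V) s u → s < g.length →
        pvRA g (fun x => x ∈ pool) s u := by
      intro s u h
      induction h with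
      | refl s hsV => exact fun hlt => pvRA.refl s ((hpool s).2 ⟨hlt, hsV⟩)
      | step s t u hsV he ht ih =>
        intro hlt
        have hrow : g.getD s [] ∈ g := by
          rw [List.getD_eq_getElem?_getD, List.getElem?_eq_getElem hlt]
          exact List.getElem_mem _
        have htlt : t < g.length := by
          have h1 := he.1
          have h2 := Hg _ hrow
          omega
        exact pvRA.step s t u ((hpool s).2 ⟨hlt, hsV⟩) he (ih htlt)
    exact fun h => aux seed u h hs
  · exact pvRA_mono (fun x hx => ((hpool x).1 hx).2)

lemma outer_spec (g : List (List Int)) (Hg : ∀ row ∈ g, row.length = g.length) :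
    ∀ (l : List Nat) (V : PySem.Set Nat) (comps : List (List Nat)) (fuelp : Nat),
      l.Nodup →
      (List.range g.length).filter (fun x => x ∉ V) = l.filter (fun x => x ∉ V) →
      (l.filter (fun x => x ∉ V)).length ≤ fuelp →
      (l.foldl (dfsStep g) (comps, V)).1.map List.length =
        comps.map List.length ++ peel g fuelp (l.filter (fun x => x ∉ V)) := by
  intro l
  induction l with
  | nil =>
    intro V comps fuelp _ _ _
    cases fuelp <;> simp [peel]
  | cons v l' ih =>
    intro V comps fuelp hnd hinv hfp
    by_cases hv : v ∈ V
    · have hstep : dfsStep g (comps, V) v = (comps, V) := by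
        unfold dfsStep
        rw [if_pos hv]
      have hfilter : (v :: l').filter (fun x => x ∉ V) = l'.filter (fun x => x ∉ V) := by
        simp [hv]
      rw [List.foldl_cons, hstep, hfilter]
      exact ih V comps fuelp (List.nodup_cons.1 hnd).2 (by rw [hinv, hfilter])
        (by rw [← hfilter]; exact hfp)
    · have hfilter : (v :: l').filter (fun x => x ∉ V) = v :: l'.filter (fun x => x ∉ V) := by
        simp [hv]
      set t' := l'.filter (fun x => x ∉ V) with ht'
      obtain ⟨δ, hA1, hA2, hA3, hA4⟩ := dfsLoop_spec g (1 + pvListWeight g) [v] V []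
        (by simpa using Nat.add_le_add_left (pvWeight_le g V) 1)
      have hA3' : ∀ u, u ∈ δ ↔ pvRA g (fun x => x ∉ V) v u := by
        intro u
        rw [hA3 u]
        constructor
        · rintro ⟨s, hs, hra⟩
          have hsv : s = v := by simpa using hs
          exact hsv ▸ hra
        · exact fun h => ⟨v, by simp, h⟩
      have hstep : dfsStep g (comps, V) v =
          (comps ++ [(dfsLoop g (1 + pvListWeight g) [v] V []).1], (dfsLoop g (1 + pvListWeight g) [v] V []).2) := by
        unfold dfsStep
        rw [if_neg hv]
      have hpoolmem : ∀ x : Nat, x ∈ v :: t' ↔ x < g.length ∧ x ∉ V := by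
        intro x
        rw [← hfilter, ← hinv]
        simp [List.mem_filter, List.mem_range]
      have hvlt : v < g.length := ((hpoolmem v).1 (by simp)).1
      have hpoolnd : (v :: t').Nodup := by
        rw [← hfilter]
        exact List.Nodup.filter _ hnd
      obtain ⟨hB1, hB2, hB3, hB4, hB5⟩ := saturate_spec g (v :: t')
        (pvRA g (fun x => x ∈ v :: t') v)
        (fun c u hc hu he => pvRA_snoc hc he hu)
        ((v :: t').length + 1) [v] hpoolnd (by simp) (by simp)
        (by simp)
        (by
          intro x hx
          have hxv : x = v := by simpa using hx
          subst hxv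
          exact pvRA.refl x (by simp))
      set C := saturate g (v :: t') ((v :: t').length + 1) [v] with hC
      have hCmem : ∀ u, u ∈ C ↔ pvRA g (fun x => x ∈ v :: t') v u :=
        stable_reach g (v :: t') v C (hB2 v (by simp)) hB4 hB5
      have hδC : ∀ u, u ∈ δ ↔ u ∈ C := by
        intro u
        rw [hA3' u, hCmem u, pvRA_bridge g V (v :: t') Hg hpoolmem v hvlt u]
      have hlen : δ.length = C.length := nodup_len_eq δ C hA2 hB1 hδC
      obtain ⟨fp, rfl⟩ : ∃ fp, fuelp = fp + 1 := by
        rw [hfilter] at hfp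
        cases fuelp with
        | zero => simp at hfp
        | succ fp => exact ⟨fp, rfl⟩
      have hpeel : peel g (fp + 1) (v :: t') =
          C.length :: peel g fp ((v :: t').filter (fun u => u ∉ C)) := rfl
      have hnext1 : (v :: t').filter (fun u => u ∉ C) = (v :: t').filter (fun u => u ∉ δ) := by
        apply List.filter_congr
        intro x _
        simp [hδC x]
      have hstep2 : (v :: t').filter (fun u => u ∉ δ) = t'.filter (fun u => u ∉ δ) := by
        have hvδ : v ∈ δ := (hA3' v).2 (pvRA.refl v hv)
        simp [hvδ]
      have hmain : l'.filter (fun x => x ∉ (dfsLoop g (1 + pvListWeight g) [v] V []).2) =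
          t'.filter (fun u => u ∉ δ) := by
        rw [filter_two l' _ V δ hA4, ht']
      have hrinv : (List.range g.length).filter (fun x => x ∉ (dfsLoop g (1 + pvListWeight g) [v] V []).2) =
          l'.filter (fun x => x ∉ (dfsLoop g (1 + pvListWeight g) [v] V []).2) := by
        rw [filter_two (List.range g.length) _ V δ hA4, hinv, hfilter, hstep2, ← hmain]
      rw [List.foldl_cons, hstep, hfilter, hpeel, hnext1, hstep2, ← hmain]
      have hfp' : (l'.filter (fun x => x ∉ (dfsLoop g (1 + pvListWeight g) [v] V []).2)).length ≤ fp := by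
        rw [hmain]
        have h1 : (t'.filter (fun u => u ∉ δ)).length ≤ t'.length := List.length_filter_le _ _
        have h2 : (v :: t').length ≤ fp + 1 := by rw [← hfilter]; exact hfp
        simp only [List.length_cons] at h2
        omega
      rw [ih (dfsLoop g (1 + pvListWeight g) [v] V []).2 (comps ++ [(dfsLoop g (1 + pvListWeight g) [v] V []).1])
        fp (List.nodup_cons.1 hnd).2 hrinv hfp']
      have hr1 : (dfsLoop g (1 + pvListWeight g) [v] V []).1 = δ := by simpa using hA1
      simp [hr1, hlen]

lemma not_all_any (L : List Nat) (p : Nat → Bool) :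
    (!(L.all p)) = L.any (fun x => !p x) := by
  induction L with
  | nil => simp
  | cons a t ih => simp [ih]

theorem main_equiv : ∀ (adj_matrix : List (List Int)),
    is_k2_join_kn4_plus_2k1 adj_matrix = is_k2_join_kn4_plus_2k1_alt adj_matrix := by
  intro adj
  unfold is_k2_join_kn4_plus_2k1 is_k2_join_kn4_plus_2k1_alt
  dsimp only
  have hdeg : (List.range adj.length).filter
        (fun i => decide ((adj.map fun row => row.sum).getD i 0 = (adj.length : Int) - 1)) =
      (List.range adj.length).filter
        (fun i => decide ((adj.getD i []).sum = (adj.length : Int) - 1)) := by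
    apply List.filter_congr
    intro i hi
    have hi' : i < adj.length := List.mem_range.1 hi
    have heq : (adj.map fun row => row.sum).getD i 0 = (adj.getD i []).sum := by
      simp [List.getD_eq_getElem?_getD, List.getElem?_eq_getElem hi',
        List.getElem?_map]
    rw [heq]
  rw [hdeg]
  by_cases hrag : (adj.any fun row => decide (row.length ≠ adj.length)) = true
  · rw [if_pos hrag, if_pos hrag]
  · rw [if_neg hrag, if_neg hrag]
    set hubs := (List.range adj.length).filter
      (fun i => decide ((adj.getD i []).sum = (adj.length : Int) - 1)) with hhubs
    by_cases hlen2 : hubs.length ≠ 2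
    · rw [if_pos hlen2, if_pos hlen2]
    · rw [if_neg hlen2, if_neg hlen2]
      set rest := (List.range adj.length).filter (fun v => decide (v ∉ hubs)) with hrest
      set sub := rest.map (fun i => rest.map (fun j => (adj.getD i []).getD j 0)) with hsub
      have Hg : ∀ row ∈ sub, row.length = sub.length := by
        intro row hrow
        rw [hsub] at hrow
        obtain ⟨i, _, rfl⟩ := List.mem_map.1 hrow
        simp [hsub]
      have hsizes : ((List.range sub.length).foldl (dfsStep sub)
          ([], PySem.Set.empty)).1.map List.length = peel sub sub.length (List.range sub.length) := by
        have hinv : (List.range sub.length).filter (fun x => x ∉ PySem.Set.empty) =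
            (List.range sub.length).filter (fun x => x ∉ PySem.Set.empty) := rfl
        have := outer_spec sub Hg (List.range sub.length) PySem.Set.empty [] sub.length
          (List.nodup_range) hinv
          (by simp)
        rw [this]
        have hid : (List.range sub.length).filter (fun x => x ∉ PySem.Set.empty) =
            List.range sub.length := by
          apply List.filter_eq_self.2
          intro x _
          simp [PySem.Set.empty]
        rw [hid]
        simp
      have hcast : ((List.range sub.length).foldl (dfsStep sub)
            ([], PySem.Set.empty)).1.map (fun c => (c.length : Int)) =
          (peel sub sub.length (List.range sub.length)).map (fun s => Int.ofNat s) := by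
        rw [← hsizes, List.map_map]
        rfl
      rw [hcast]
      set srt := PySem.List.sorted
        ((peel sub sub.length (List.range sub.length)).map (fun s => Int.ofNat s)) (fun x => x) false
        with hsrt
      have hany : (hubs.any fun v =>
            !(rest.all fun rv => decide ((adj.getD v []).getD rv 0 = 1))) =
          (hubs.any fun h => rest.any fun v => decide ((adj.getD h []).getD v 0 ≠ 1)) := by
        have hfn : (fun v => !(rest.all fun rv => decide ((adj.getD v []).getD rv 0 = 1))) =
            (fun h => rest.any fun v => decide ((adj.getD h []).getD v 0 ≠ 1)) := by
          funext v
          rw [not_all_any]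
          congr 1
          funext rv
          simp [decide_not]
        rw [hfn]
      rw [hany]
      by_cases hs : srt = [1, 1, (adj.length : Int) - 4]
      · rw [if_neg (by simpa using hs)]
        by_cases hq : (hubs.any fun h => rest.any fun v =>
            decide ((adj.getD h []).getD v 0 ≠ 1)) = true
        · rw [if_pos hq, if_pos hq]
        · rw [if_neg hq, if_neg hq]
          simp [hs]
      · rw [if_pos hs]
        by_cases hq : (hubs.any fun h => rest.any fun v =>
            decide ((adj.getD h []).getD v 0 ≠ 1)) = true
        · rw [if_pos hq]
        · rw [if_neg hq]
          simp [hs]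

-- ===== VERDICT (by name: the statement is the Claim_ definition above) =====
theorem is_k2_join_kn4_plus_2k1_spec : Claim_equal_is_k2_join_kn4_plus_2k1 := by
  intro adj _
  unfold Spec_is_k2_join_kn4_plus_2k1
  exact main_equiv adj
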